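-- pv_equiv track=rewrite | github.com/lindows310/LRsOP | LAB01 (Py)/PythonApplication1/PythonApplication1.py | recFunc2
-- ===== SOURCE A (Python) =====
-- def recFunc2(minNum, maxNum, num):
--     if (num > 0):
--         temp = num
--         temp %= 10
--         if (temp > maxNum):
--             maxNum = temp
--         if (temp < minNum):
--             minNum = temp
--         num //= 10
--         return recFunc2(minNum, maxNum, num)
--     else:
--         return (minNum - maxNum)
-- ===== SOURCE B (Python) =====
-- def recFunc2(minNum, maxNum, num):
--     while num > 0:
--         temp = num % 10
--         if temp > maxNum:
--             maxNum = temp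
--         if temp < minNum:
--             minNum = temp
--         num //= 10
--     return minNum - maxNum
-- ===== Notes on version B (the rewrite author's own statement) =====
-- stated objective: simpler
-- what changed: Replaces A's tail recursion with an iterative while loop that peels digits in place, updating the same min/max accumulators and returning minNum - maxNum once num is exhausted.
import Mathlib
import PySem

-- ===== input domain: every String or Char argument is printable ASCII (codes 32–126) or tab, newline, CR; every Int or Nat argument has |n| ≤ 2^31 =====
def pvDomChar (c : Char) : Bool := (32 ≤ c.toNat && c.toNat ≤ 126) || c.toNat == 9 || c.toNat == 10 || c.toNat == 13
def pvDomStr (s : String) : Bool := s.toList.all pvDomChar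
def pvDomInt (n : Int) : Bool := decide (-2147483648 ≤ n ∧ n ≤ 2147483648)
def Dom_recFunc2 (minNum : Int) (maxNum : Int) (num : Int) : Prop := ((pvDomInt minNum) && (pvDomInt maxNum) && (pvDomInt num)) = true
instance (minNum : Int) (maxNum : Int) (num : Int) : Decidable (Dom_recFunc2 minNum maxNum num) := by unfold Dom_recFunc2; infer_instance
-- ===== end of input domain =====

-- B replaces A's tail recursion with an iterative digit-peeling loop (same accumulators); objective: simpler.


-- num // 10 strictly shrinks a positive num (termination measure for both loops)
theorem pvFloordiv10_lt (num : Int) (h : 0 < num) :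
    (PySem.Int.floordiv num 10).toNat < num.toNat := by
  rw [PySem.Int.floordiv_eq_ediv_of_pos (by omega : (0:Int) < 10)]
  omega

-- ===== PORT A =====
def recFunc2 (minNum : Int) (maxNum : Int) (num : Int) : Int :=
  if num > 0 then
    let temp := PySem.Int.mod num 10
    let maxNum := if temp > maxNum then temp else maxNum
    let minNum := if temp < minNum then temp else minNum
    recFunc2 minNum maxNum (PySem.Int.floordiv num 10)
  else
    minNum - maxNum
termination_by num.toNat
decreasing_by exact pvFloordiv10_lt num (by omega)

-- ===== PORT B =====
-- the `while num > 0:` loop of Source B, carrying its mutable state (minNum, maxNum, num)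
def recFunc2Loop (minNum : Int) (maxNum : Int) (num : Int) : Int × Int :=
  if num > 0 then
    let temp := PySem.Int.mod num 10
    recFunc2Loop
      (if temp < minNum then temp else minNum)
      (if temp > maxNum then temp else maxNum)
      (PySem.Int.floordiv num 10)
  else
    (minNum, maxNum)
termination_by num.toNat
decreasing_by exact pvFloordiv10_lt num (by omega)

def recFunc2_alt (minNum : Int) (maxNum : Int) (num : Int) : Int :=
  let st := recFunc2Loop minNum maxNum num
  st.1 - st.2

-- ===== PRECONDITION & SPEC =====
def Spec_recFunc2 (minNum : Int) (maxNum : Int) (num : Int) (out : Int) : Prop := out = recFunc2_alt minNum maxNum num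
instance (minNum : Int) (maxNum : Int) (num : Int) (out : Int) : Decidable (Spec_recFunc2 minNum maxNum num out) := by unfold Spec_recFunc2; infer_instance

-- ===== CLAIM (what is proved, stated in full; the proofs are below) =====
def Claim_equal_recFunc2 : Prop := ∀ (minNum : Int) (maxNum : Int) (num : Int), Dom_recFunc2 minNum maxNum num → Spec_recFunc2 minNum maxNum num (recFunc2 minNum maxNum num)

-- ===== LEMMAS AND PROOFS =====
theorem recFunc2_eq_loop (minNum maxNum num : Int) :
    recFunc2 minNum maxNum num =
      (recFunc2Loop minNum maxNum num).1 - (recFunc2Loop minNum maxNum num).2 := by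
  induction minNum, maxNum, num using recFunc2.induct with
  | case1 minNum maxNum num h temp maxNum' minNum' ih =>
    rw [recFunc2, recFunc2Loop]
    simp only [if_pos h]
    exact ih
  | case2 minNum maxNum num h =>
    rw [recFunc2, recFunc2Loop]
    simp only [if_neg h]

-- ===== VERDICT (by name: the statement is the Claim_ definition above) =====
theorem recFunc2_spec : Claim_equal_recFunc2 := by
  intro minNum maxNum num _
  unfold Spec_recFunc2 recFunc2_alt
  exact recFunc2_eq_loop minNum maxNum num
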